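-- pv_equiv track=rewrite | github.com/geoffcysu/nlptools | pyadt.py | typevarList
-- ===== SOURCE A (Python) =====
-- from typing import Generic, TypeVar, Tuple, List, Literal, Optional, Dict, Iterable, Callable, Iterator, Sequence
-- from itertools import chain,count,repeat
-- from string import ascii_uppercase
--
-- _upperCases : list[str] = [c for c in ascii_uppercase]
--
-- def typevarList(n:int)->List[str]:
--     "Generate the list: _A,_B,_C..,_A1,_B1...,_A2,_B2,..."
--     it = ('_'+x for x in
--             chain(# chain: *Iterable[T] -> Iterable[T]
--                 _upperCases,
--                 chain.from_iterable(# from_iterable: Iterable[Iterable[T]]->Iterable[T]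
--                     #Iterable[Iterable[str]]
--                     ((x+str(i) for x in _upperCases) for i in
--                         count(1)))
--             )
--         )
--     return [next(it) for _ in range(n)]
-- ===== SOURCE B (Python) =====
-- from string import ascii_uppercase
--
-- _letters = list(ascii_uppercase)
--
-- def typevarList(n: int) -> list:
--     "Generate the list: _A,_B,_C..,_A1,_B1...,_A2,_B2,..."
--     out = []
--     for i in range(n):
--         q, r = divmod(i, 26)
--         out.append('_' + _letters[r] + ('' if q == 0 else str(q)))
--     return out
-- ===== Notes on version B (the rewrite author's own statement) =====
-- stated objective: simpler
-- what changed: Replaced the chained lazy iterators (chain/count/chain.from_iterable with next() pulls) by direct positional arithmetic: each label i is computed from divmod(i, 26) in one comprehension-style loop over range(n).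
import Mathlib
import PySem

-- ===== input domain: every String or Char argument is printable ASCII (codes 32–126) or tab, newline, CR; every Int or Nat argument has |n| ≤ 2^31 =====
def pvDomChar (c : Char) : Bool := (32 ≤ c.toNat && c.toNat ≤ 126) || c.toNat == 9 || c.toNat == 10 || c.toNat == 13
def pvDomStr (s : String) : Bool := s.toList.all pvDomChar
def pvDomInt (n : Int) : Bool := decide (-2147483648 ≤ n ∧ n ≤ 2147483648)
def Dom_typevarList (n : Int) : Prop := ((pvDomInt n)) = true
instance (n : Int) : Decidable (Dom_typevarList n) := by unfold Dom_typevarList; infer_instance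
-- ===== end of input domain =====

-- B drops the chained lazy iterators of A and computes each label directly from divmod(i, 26); equal output, same O(n) cost.

-- ===== PORT A =====
-- _upperCases = list(ascii_uppercase)
def upperCases : List String :=
  ["A","B","C","D","E","F","G","H","I","J","K","L","M",
   "N","O","P","Q","R","S","T","U","V","W","X","Y","Z"]

-- A's iterator is chain(_upperCases, chain.from_iterable(blocks)), a lazy stream of
-- 26-element blocks; taking k elements starting at block i consumes whole blocks until
-- fewer than 26 remain (the list comprehension always starts at a block boundary).
def pyChainTake : Nat → Nat → List String
  | 0, _ => []
  | Nat.succ k, i =>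
    let blk := if i = 0 then upperCases
               else upperCases.map (fun x => x ++ PySem.Int.toStr (Int.ofNat i))
    if k + 1 ≤ 26 then blk.take (k + 1)
    else blk ++ pyChainTake (k + 1 - 26) (i + 1)
  decreasing_by omega

def typevarList (n : Int) : List String :=
  ((pyChainTake n.toNat 0).map (fun x => "_" ++ x))

-- ===== PORT B =====
-- Python B's _letters[r] never goes out of range (0 ≤ r < 26), so pyGetD is exact here.
def typevarList_alt (n : Int) : List String :=
  (PySem.List.pyRange 0 n 1).map (fun i =>
    let q := PySem.Int.floordiv i 26
    let r := PySem.Int.mod i 26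
    "_" ++ PySem.List.pyGetD upperCases r "" ++ (if q = 0 then "" else PySem.Int.toStr q))

-- ===== PRECONDITION & SPEC =====
def Spec_typevarList (n : Int) (out : List String) : Prop := out = typevarList_alt n
instance (n : Int) (out : List String) : Decidable (Spec_typevarList n out) := by unfold Spec_typevarList; infer_instance

-- ===== CLAIM (what is proved, stated in full; the proofs are below) =====
def Claim_equal_typevarList : Prop := ∀ (n : Int), Dom_typevarList n → Spec_typevarList n (typevarList n)

-- ===== LEMMAS AND PROOFS =====

-- the canonical label body at global position m
def coreLabel (m : Nat) : String :=
  upperCases.getD (m % 26) "" ++ (if m / 26 = 0 then "" else PySem.Int.toStr (m / 26))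

theorem upperCases_length : upperCases.length = 26 := by decide

theorem blk_eq (i : Nat) :
    (if i = 0 then upperCases
     else upperCases.map (fun x => x ++ PySem.Int.toStr (Int.ofNat i)))
    = (List.range 26).map (fun j => coreLabel (26 * i + j)) := by
  apply List.ext_getElem
  · split <;> simp [upperCases_length]
  · intro j h1 h2
    have hj : j < 26 := by
      revert h1; split <;> simp [upperCases_length]
    have hjl : j < upperCases.length := by simp [upperCases_length]; omega
    have hmod : (26 * i + j) % 26 = j := by omega
    have hdiv : (26 * i + j) / 26 = i := by omega
    simp only [List.getElem_map, List.getElem_range, coreLabel]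
    rw [hmod, hdiv, List.getD_eq_getElem upperCases "" hjl]
    by_cases hi : i = 0
    · simp [hi]
    · simp [hi, Int.ofNat_eq_natCast]
      congr 1
      omega

theorem pyChainTake_eq (k i : Nat) :
    pyChainTake k i = (List.range k).map (fun j => coreLabel (26 * i + j)) := by
  fun_induction pyChainTake k i with
  | case1 i => simp
  | case2 k i blk hle =>
    show blk.take (k + 1) = _
    rw [show blk = _ from blk_eq i, ← List.map_take, List.take_range,
        show min (k + 1) 26 = k.succ from by omega]
  | case3 k i blk hle ih =>
    show blk ++ pyChainTake (k + 1 - 26) (i + 1) = _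
    rw [show blk = _ from blk_eq i, ih]
    conv_rhs => rw [show k.succ = 26 + (k + 1 - 26) from by omega, List.range_add,
      List.map_append, List.map_map]
    congr 1
    apply List.map_congr_left
    intro j _
    simp only [Function.comp]
    congr 1
    ring

theorem alt_eq (n : Int) :
    typevarList_alt n = (List.range n.toNat).map (fun m => "_" ++ coreLabel m) := by
  unfold typevarList_alt
  rw [PySem.List.pyRange_one, List.map_map]
  simp only [Int.sub_zero]
  apply List.map_congr_left
  intro m _
  simp only [Function.comp_apply, zero_add]
  have hq : PySem.Int.floordiv (↑m) 26 = ((m / 26 : Nat) : Int) := by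
    exact_mod_cast PySem.Int.floordiv_natCast m 26
  have hr : PySem.Int.mod (↑m) 26 = ((m % 26 : Nat) : Int) := by
    exact_mod_cast PySem.Int.mod_natCast m 26
  rw [hq, hr, PySem.List.pyGetD_natCast upperCases (m % 26) ""]
  have hc : ((m : Int) / 26 = 0) ↔ m < 26 := by omega
  simp [coreLabel, String.append_assoc, List.getD_eq_getElem?_getD, hc]

-- ===== VERDICT (by name: the statement is the Claim_ definition above) =====
theorem typevarList_spec : Claim_equal_typevarList := by
  intro n _
  show typevarList n = typevarList_alt n
  rw [alt_eq, typevarList, pyChainTake_eq, List.map_map]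
  apply List.map_congr_left
  intro j _
  simp [Function.comp]
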